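-- pv_equiv track=rewrite | github.com/ryanku98/SETpp | app/models.py | log_header
-- ===== SOURCE A (Python) =====
-- def log_header(title):
--     """Simple function to return a string of a title surrounded by dashes to represent a distinct section of log outputs"""
--     if len(title) == 0:
--         return '----------------------------------------------------------------------'
--     while len(title) < 70:
--         if len(title) % 2 == 0:
--             title = '-' + title
--         else:
--             title = title + '-'
--     return title
-- ===== SOURCE B (Python) =====
-- def log_header(title):
--     """Simple function to return a string of a title surrounded by dashes to represent a distinct section of log outputs"""
--     return title.center(70, '-')
-- ===== Notes on version B (the rewrite author's own statement) =====
-- stated objective: idiomatic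
-- what changed: Replaces the one-dash-at-a-time parity loop (and the empty-title special case) with a single closed-form str.center(70, '-') call.
import Mathlib
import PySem

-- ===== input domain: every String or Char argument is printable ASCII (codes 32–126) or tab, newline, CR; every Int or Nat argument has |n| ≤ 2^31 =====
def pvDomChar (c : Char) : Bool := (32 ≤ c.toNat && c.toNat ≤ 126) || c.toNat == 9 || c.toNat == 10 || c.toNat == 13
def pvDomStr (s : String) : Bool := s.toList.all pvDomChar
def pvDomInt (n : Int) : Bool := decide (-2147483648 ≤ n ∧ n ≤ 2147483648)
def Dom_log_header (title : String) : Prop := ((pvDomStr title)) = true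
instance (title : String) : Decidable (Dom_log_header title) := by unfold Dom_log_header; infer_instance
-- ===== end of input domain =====

-- B replaces A's one-dash-at-a-time parity loop with the closed-form title.center(70, '-') (idiomatic; return value only).


-- ===== PORT A =====
-- A's while loop, on the char list: prepend '-' when the length is even, append '-' when odd
def logHeaderLoop (l : List Char) : List Char :=
  if _h : l.length < 70 then
    if l.length % 2 = 0 then logHeaderLoop ('-' :: l)
    else logHeaderLoop (l ++ ['-'])
  else l
termination_by 70 - l.length
decreasing_by
  · simp; omega
  · simp; omega

def log_header (title : String) : String :=
  if title.toList.length = 0 then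
    "----------------------------------------------------------------------"
  else String.ofList (logHeaderLoop title.toList)

-- ===== PORT B =====
-- title.center(70, '-'): exact to CPython for even width 70 (left margin = (70-n)//2, extra fill char on the right)
def log_header_alt (title : String) : String :=
  if 70 ≤ title.toList.length then title
  else String.ofList
    (List.replicate ((70 - title.toList.length) / 2) '-' ++ title.toList ++
     List.replicate ((70 - title.toList.length) - (70 - title.toList.length) / 2) '-')

-- ===== PRECONDITION & SPEC =====
def Spec_log_header (title : String) (out : String) : Prop := out = log_header_alt title
instance (title : String) (out : String) : Decidable (Spec_log_header title out) := by unfold Spec_log_header; infer_instance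

-- ===== CLAIM (what is proved, stated in full; the proofs are below) =====
def Claim_equal_log_header : Prop := ∀ (title : String), Dom_log_header title → Spec_log_header title (log_header title)

-- ===== LEMMAS AND PROOFS =====

-- the loop realises the even split with the extra dash on the right
theorem logHeaderLoop_eq (l : List Char) :
    logHeaderLoop l =
      List.replicate ((70 - l.length) / 2) '-' ++ l ++
        List.replicate ((70 - l.length) - (70 - l.length) / 2) '-' := by
  by_cases h : l.length < 70
  · by_cases hp : l.length % 2 = 0
    · rw [logHeaderLoop, dif_pos h, if_pos hp, logHeaderLoop_eq ('-' :: l)]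
      have hl : ('-' :: l).length = l.length + 1 := rfl
      rw [hl,
        show (70 - l.length) - (70 - l.length) / 2
           = (70 - (l.length + 1)) - (70 - (l.length + 1)) / 2 from by omega,
        show (70 - l.length) / 2 = (70 - (l.length + 1)) / 2 + 1 from by omega]
      simp [List.replicate_succ', List.append_assoc]
    · rw [logHeaderLoop, dif_pos h, if_neg hp, logHeaderLoop_eq (l ++ ['-'])]
      have hl : (l ++ ['-']).length = l.length + 1 := by simp
      rw [hl,
        show (70 - l.length) - (70 - l.length) / 2
           = ((70 - (l.length + 1)) - (70 - (l.length + 1)) / 2) + 1 from by omega,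
        show (70 - l.length) / 2 = (70 - (l.length + 1)) / 2 from by omega]
      simp [List.replicate_succ, List.append_assoc]
  · rw [logHeaderLoop, dif_neg h]
    have hz : 70 - l.length = 0 := by omega
    simp [hz]
termination_by 70 - l.length
decreasing_by
  · simp; omega
  · simp; omega

-- ===== VERDICT (by name: the statement is the Claim_ definition above) =====
theorem log_header_spec : Claim_equal_log_header := by
  intro title _
  unfold Spec_log_header log_header log_header_alt
  by_cases h0 : title.toList.length = 0
  · have hl : title.toList = [] := List.length_eq_zero_iff.mp h0
    have ht : title = "" := by
      have := congrArg String.ofList hl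
      simpa using this
    rw [ht]
    decide
  · rw [if_neg h0, logHeaderLoop_eq]
    by_cases h70 : 70 ≤ title.toList.length
    · have hz : 70 - title.toList.length = 0 := by omega
      rw [if_pos h70, hz]
      simp
    · rw [if_neg h70]
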